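-- pv_equiv track=rewrite | github.com/JngMkk/Algorithm | Exercise/Programmers/Python/Greedy/132266.py | solution
-- ===== SOURCE A (Python) =====
-- def solution(n, roads, sources, destination):
--     from collections import deque
--
--     graph = [[] for _ in range(n + 1)]
--     for x, y in roads:
--         graph[x].append(y)
--         graph[y].append(x)
--
--     dist = [-1] * (n + 1)
--     dist[destination] = 0
--     queue = deque([(destination, 0)])
--     while queue:
--         node, cost = queue.popleft()
--         for x in graph[node]:
--             if dist[x] == -1:
--                 dist[x] = cost + 1
--                 queue.append((x, cost + 1))
--
--     return [dist[source] for source in sources]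
-- ===== SOURCE B (Python) =====
-- def solution(n, roads, sources, destination):
--     dist = [-1] * (n + 1)
--     dist[destination] = 0
--     level = 0
--     while True:
--         new = list(dist)
--         changed = False
--         for x, y in roads:
--             if dist[x] == level and dist[y] == -1:
--                 new[y] = level + 1
--                 changed = True
--             if dist[y] == level and dist[x] == -1:
--                 new[x] = level + 1
--                 changed = True
--         dist = new
--         if not changed:
--             break
--         level += 1
--     return [dist[source] for source in sources]
-- ===== Notes on version B (the rewrite author's own statement) =====
-- stated objective: alternative
-- what changed: Replaces BFS over an adjacency list with a queue by edge-centric synchronous rounds (unit-weight Bellman-Ford with early exit): no graph is built and no queue/frontier is kept; each round scans the raw edge list and writes level+1 into a fresh copy of dist for every edge touching a node at the current level, stopping when a round changes nothing.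
import Mathlib
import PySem

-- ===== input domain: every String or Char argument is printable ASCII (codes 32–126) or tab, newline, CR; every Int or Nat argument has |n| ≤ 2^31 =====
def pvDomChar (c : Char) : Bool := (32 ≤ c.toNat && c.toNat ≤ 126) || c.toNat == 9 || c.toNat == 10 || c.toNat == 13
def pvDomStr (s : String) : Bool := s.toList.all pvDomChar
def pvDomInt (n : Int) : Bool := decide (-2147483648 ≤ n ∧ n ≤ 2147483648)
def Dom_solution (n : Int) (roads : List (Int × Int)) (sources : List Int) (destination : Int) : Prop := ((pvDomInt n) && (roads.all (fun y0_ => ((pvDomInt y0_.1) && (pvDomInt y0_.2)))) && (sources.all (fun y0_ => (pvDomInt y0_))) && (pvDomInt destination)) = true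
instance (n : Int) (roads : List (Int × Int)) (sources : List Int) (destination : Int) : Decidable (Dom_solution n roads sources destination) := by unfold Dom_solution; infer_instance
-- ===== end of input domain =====

-- B replaces A's adjacency-list BFS with a queue by edge-centric synchronous rounds
-- (unit-weight Bellman-Ford with early exit): no graph is built and no queue is kept;
-- same return value on Pre_.

-- ===== PORT A =====
-- Python list index l[i]: negative i counts from the end; exact on Pre_ (indices in [-len, len-1])
def pvIdx (L : Nat) (i : Int) : Nat := if i < 0 then (i + L).toNat else i.toNat

-- graph[x].append(y)
def adjAdd (g : List (List Int)) (x y : Int) : List (List Int) :=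
  g.set (pvIdx g.length x) ((g.getD (pvIdx g.length x) []) ++ [y])

def buildGraph (n : Int) (roads : List (Int × Int)) : List (List Int) :=
  roads.foldl (fun g p => adjAdd (adjAdd g p.1 p.2) p.2 p.1) (List.replicate (n + 1).toNat [])

-- body of A's inner 'for x in graph[node]' loop
def relaxA (cost : Int) (st : List Int × List (Int × Int)) (x : Int) : List Int × List (Int × Int) :=
  if st.1.getD (pvIdx st.1.length x) 0 = -1 then
    (st.1.set (pvIdx st.1.length x) (cost + 1), st.2 ++ [(x, cost + 1)])
  else st

def stepA (g : List (List Int)) (node cost : Int) (st : List Int × List (Int × Int)) :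
    List Int × List (Int × Int) :=
  (g.getD (pvIdx g.length node) []).foldl (relaxA cost) st

-- A's 'while queue' loop; the fuel n.toNat + 1 is provably sufficient on Pre_ (lemmas below)
def loopA (g : List (List Int)) : Nat → List Int → List (Int × Int) → List Int
  | _, dist, [] => dist
  | 0, dist, _ :: _ => dist
  | f + 1, dist, (node, cost) :: rest =>
      let st := stepA g node cost (dist, rest)
      loopA g f st.1 st.2

def solution (n : Int) (roads : List (Int × Int)) (sources : List Int) (destination : Int) : List Int :=
  let g := buildGraph n roads
  let dist := loopA g (n.toNat + 1)
      ((List.replicate (n + 1).toNat (-1 : Int)).set (pvIdx (n + 1).toNat destination) 0)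
      [(destination, 0)]
  sources.map (fun s => dist.getD (pvIdx dist.length s) 0)

-- ===== PORT B =====
-- body of B's 'for x, y in roads' loop: reads the old dist, writes level+1 into new (= st.1)
def syncEdge (dist : List Int) (level : Int) (st : List Int × Bool) (p : Int × Int) :
    List Int × Bool :=
  let st1 := if dist.getD (pvIdx dist.length p.1) 0 = level ∧
                dist.getD (pvIdx dist.length p.2) 0 = -1 then
      (st.1.set (pvIdx st.1.length p.2) (level + 1), true) else st
  if dist.getD (pvIdx dist.length p.2) 0 = level ∧
      dist.getD (pvIdx dist.length p.1) 0 = -1 then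
    (st1.1.set (pvIdx st1.1.length p.1) (level + 1), true) else st1

-- one round: new = list(dist); changed = False; for x, y in roads: …
def syncRound (roads : List (Int × Int)) (level : Int) (dist : List Int) : List Int × Bool :=
  roads.foldl (syncEdge dist level) (dist, false)

-- B's 'while True' loop; the fuel n.toNat + 2 is provably sufficient on Pre_ (lemmas below)
def loopS (roads : List (Int × Int)) : Nat → List Int → Int → List Int
  | 0, d, _ => d
  | f + 1, d, level =>
      let r := syncRound roads level d
      if r.2 then loopS roads f r.1 (level + 1) else r.1

def solution_alt (n : Int) (roads : List (Int × Int)) (sources : List Int) (destination : Int) : List Int :=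
  let dist := loopS roads (n.toNat + 2)
      ((List.replicate (n + 1).toNat (-1 : Int)).set (pvIdx (n + 1).toNat destination) 0) 0
  sources.map (fun s => dist.getD (pvIdx dist.length s) 0)

-- ===== PRECONDITION & SPEC =====
-- Pre_ is exactly where Python A returns: 0 ≤ n and every node id a valid Python index into a
-- list of length n+1 (i.e. in [-(n+1), n]); outside it A raises IndexError.
def Pre_solution (n : Int) (roads : List (Int × Int)) (sources : List Int) (destination : Int) : Prop :=
  0 ≤ n ∧ (∀ p ∈ roads, -(n + 1) ≤ p.1 ∧ p.1 ≤ n ∧ -(n + 1) ≤ p.2 ∧ p.2 ≤ n) ∧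
    (∀ s ∈ sources, -(n + 1) ≤ s ∧ s ≤ n) ∧ -(n + 1) ≤ destination ∧ destination ≤ n

instance (n : Int) (roads : List (Int × Int)) (sources : List Int) (destination : Int) : Decidable (Pre_solution n roads sources destination) := by unfold Pre_solution; infer_instance

def pvWitness_solution : Int × (List (Int × Int)) × List Int × Int := (3, [(1, 2), (2, 3)], [1, 3], 2)

def Spec_solution (n : Int) (roads : List (Int × Int)) (sources : List Int) (destination : Int) (out : List Int) : Prop := out = solution_alt n roads sources destination
instance (n : Int) (roads : List (Int × Int)) (sources : List Int) (destination : Int) (out : List Int) : Decidable (Spec_solution n roads sources destination out) := by unfold Spec_solution; infer_instance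

-- ===== CLAIM (what is proved, stated in full; the proofs are below) =====
def Claim_equal_solution : Prop := ∀ (n : Int) (roads : List (Int × Int)) (sources : List Int) (destination : Int), Dom_solution n roads sources destination → Pre_solution n roads sources destination → Spec_solution n roads sources destination (solution n roads sources destination)

-- ===== LEMMAS AND PROOFS =====

-- Ghost level-order BFS (proof-only): A's queue loop is first reshaped into levels, then the
-- levels are matched with B's synchronous edge rounds.
def relaxB (level : Int) (st : List Int × List Int) (x : Int) : List Int × List Int :=
  if st.1.getD (pvIdx st.1.length x) 0 = -1 then
    (st.1.set (pvIdx st.1.length x) (level + 1), st.2 ++ [x])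
  else st

def stepB (g : List (List Int)) (level : Int) (st : List Int × List Int) (node : Int) :
    List Int × List Int :=
  (g.getD (pvIdx g.length node) []).foldl (relaxB level) st

def loopB (g : List (List Int)) : Nat → List Int → List Int → Int → List Int
  | _, dist, [], _ => dist
  | 0, dist, _ :: _, _ => dist
  | f + 1, dist, node :: rest, level =>
      let st := (node :: rest).foldl (stepB g level) (dist, [])
      loopB g f st.1 st.2 (level + 1)

def processA (g : List (List Int)) (d : List Int) (q : List (Int × Int)) :
    List Int × List (Int × Int) :=
  q.foldl (fun st nc => stepA g nc.1 nc.2 st) (d, [])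

def processB (g : List (List Int)) (c : Int) (d : List Int) (F : List Int) :
    List Int × List Int :=
  F.foldl (stepB g c) (d, [])

-- a fold whose step only appends to the second component splits off its accumulator
theorem foldl_acc_split {α β : Type} (f : (List Int × List α) → β → (List Int × List α))
    (hf : ∀ d q b, f (d, q) b = ((f (d, []) b).1, q ++ (f (d, []) b).2)) :
    ∀ (l : List β) (d : List Int) (q : List α),
      l.foldl f (d, q) = ((l.foldl f (d, [])).1, q ++ (l.foldl f (d, [])).2) := by
  intro l
  induction l with
  | nil => intro d q; simp
  | cons b l ih =>
      intro d q
      simp only [List.foldl_cons]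
      rw [hf d q b, ih, ih (f (d, []) b).1 (f (d, []) b).2]
      simp

theorem relaxA_split (c : Int) : ∀ (d : List Int) (q : List (Int × Int)) (x : Int),
    relaxA c (d, q) x = ((relaxA c (d, []) x).1, q ++ (relaxA c (d, []) x).2) := by
  intro d q x
  simp only [relaxA]
  split <;> simp

theorem stepA_split (g : List (List Int)) (node cost : Int) (d : List Int) (q : List (Int × Int)) :
    stepA g node cost (d, q) = ((stepA g node cost (d, [])).1, q ++ (stepA g node cost (d, [])).2) := by
  simpa only [stepA] using
    foldl_acc_split (relaxA cost) (relaxA_split cost) (g.getD (pvIdx g.length node) []) d q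

theorem loopA_nil (g : List (List Int)) (f : Nat) (d : List Int) : loopA g f d [] = d := by
  cases f <;> rfl

theorem loopB_nil (g : List (List Int)) (f : Nat) (d : List Int) (c : Int) :
    loopB g f d [] c = d := by
  cases f <;> rfl

theorem loopA_pop (g : List (List Int)) :
    ∀ (q1 : List (Int × Int)) (f : Nat) (d : List Int) (q2 : List (Int × Int)),
      loopA g (q1.length + f) d (q1 ++ q2) =
        loopA g f (processA g d q1).1 (q2 ++ (processA g d q1).2) := by
  intro q1
  induction q1 with
  | nil =>
      intro f d q2
      simp [processA]

  | cons nc q1 ih =>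
      intro f d q2
      obtain ⟨node, cost⟩ := nc
      have hlen : ((node, cost) :: q1).length + f = (q1.length + f) + 1 := by
        simp [List.length_cons]; omega
      rw [hlen]
      show loopA g (q1.length + f) (stepA g node cost (d, q1 ++ q2)).1
            (stepA g node cost (d, q1 ++ q2)).2 = _
      rw [stepA_split g node cost d (q1 ++ q2)]
      have h2 : (q1 ++ q2) ++ (stepA g node cost (d, [])).2 =
          q1 ++ (q2 ++ (stepA g node cost (d, [])).2) := by simp
      rw [h2, ih f (stepA g node cost (d, [])).1 (q2 ++ (stepA g node cost (d, [])).2)]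
      have hp : processA g d ((node, cost) :: q1) =
          ((processA g (stepA g node cost (d, [])).1 q1).1,
            (stepA g node cost (d, [])).2 ++ (processA g (stepA g node cost (d, [])).1 q1).2) := by
        simp only [processA, List.foldl_cons]
        rw [foldl_acc_split (fun st nc => stepA g nc.1 nc.2 st)
          (fun d q b => stepA_split g b.1 b.2 d q) q1 (stepA g node cost (d, [])).1
          (stepA g node cost (d, [])).2]
      rw [hp]
      simp

-- A's processing of one level's queue is the ghost level pass, with costs c+1 attached
theorem relax_corr (c : Int) : ∀ (l : List Int) (d : List Int) (qB : List Int),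
    l.foldl (relaxA c) (d, qB.map (fun v => (v, c + 1))) =
      ((l.foldl (relaxB c) (d, qB)).1, (l.foldl (relaxB c) (d, qB)).2.map (fun v => (v, c + 1))) := by
  intro l
  induction l with
  | nil => intro d qB; simp
  | cons x l ih =>
      intro d qB
      simp only [List.foldl_cons, relaxA, relaxB]
      split
      · have : (qB.map (fun v => (v, c + 1))) ++ [(x, c + 1)] =
            (qB ++ [x]).map (fun v => (v, c + 1)) := by simp
        rw [this]; exact ih _ _
      · exact ih _ _

theorem process_corr (g : List (List Int)) (c : Int) :
    ∀ (F : List Int) (d : List Int) (qB : List Int),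
      (F.map (fun v => (v, c))).foldl (fun st nc => stepA g nc.1 nc.2 st) (d, qB.map (fun v => (v, c + 1))) =
        ((F.foldl (stepB g c) (d, qB)).1, (F.foldl (stepB g c) (d, qB)).2.map (fun v => (v, c + 1))) := by
  intro F
  induction F with
  | nil => intro d qB; simp
  | cons v F ih =>
      intro d qB
      simp only [List.map_cons, List.foldl_cons, stepA, stepB]
      rw [relax_corr c (g.getD (pvIdx g.length v) []) d qB]
      exact ih _ _

def validG (g : List (List Int)) (L : Nat) : Prop :=
  ∀ adj ∈ g, ∀ x ∈ adj, pvIdx L x < L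

theorem count_set_neg (v : Int) (hv : v ≠ -1) :
    ∀ (d : List Int) (i : Nat), i < d.length → d[i]! = -1 →
      (d.set i v).count (-1) + 1 = d.count (-1) := by
  intro d
  induction d with
  | nil => intro i h; simp at h
  | cons a t ih =>
      intro i hi hd
      cases i with
      | zero =>
          simp only [List.getElem!_eq_getElem?_getD, List.getElem?_cons_zero,
            Option.getD_some] at hd
          simp only [List.set_cons_zero, List.count_cons, hd]
          simp [hv]
      | succ j =>
          simp only [List.getElem!_eq_getElem?_getD, List.getElem?_cons_succ] at hd
          simp only [List.set_cons_succ, List.count_cons]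
          have := ih j (by simpa using Nat.lt_of_succ_lt_succ hi)
            (by simpa [List.getElem!_eq_getElem?_getD] using hd)
          omega

theorem valid_adj {g : List (List Int)} {L : Nat} (hv : validG g L) (i : Nat) :
    ∀ x ∈ g.getD i [], pvIdx L x < L := by
  intro x hx
  by_cases h : i < g.length
  · rw [List.getD_eq_getElem g [] h] at hx
    exact hv g[i] (List.getElem_mem h) x hx
  · rw [List.getD_eq_default g [] (Nat.le_of_not_lt h)] at hx
    simp at hx

-- inner pass: each appended node consumed one -1 slot; length preserved
theorem relaxB_count (c : Int) (hc : 0 ≤ c) :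
    ∀ (l : List Int) (d : List Int) (qB : List Int), (∀ x ∈ l, pvIdx d.length x < d.length) →
      (l.foldl (relaxB c) (d, qB)).1.count (-1) + (l.foldl (relaxB c) (d, qB)).2.length =
          d.count (-1) + qB.length ∧
        (l.foldl (relaxB c) (d, qB)).1.length = d.length := by
  intro l
  induction l with
  | nil => intro d qB _; simp
  | cons x l ih =>
      intro d qB hl
      have hx : pvIdx d.length x < d.length := hl x (by simp)
      simp only [List.foldl_cons, relaxB]
      by_cases h : d.getD (pvIdx d.length x) 0 = -1
      · rw [if_pos h]
        have hgd : d[pvIdx d.length x]! = -1 := by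
          rw [getElem!_pos d (pvIdx d.length x) hx, ← List.getD_eq_getElem d 0 hx]; exact h
        have hset : (d.set (pvIdx d.length x) (c + 1)).count (-1) + 1 = d.count (-1) :=
          count_set_neg (c + 1) (by omega) d (pvIdx d.length x) hx hgd
        have hlen : (d.set (pvIdx d.length x) (c + 1)).length = d.length := by simp
        have ihres := ih (d.set (pvIdx d.length x) (c + 1)) (qB ++ [x])
          (fun y hy => by rw [hlen]; exact hl y (by simp [hy]))
        refine ⟨?_, by rw [ihres.2, hlen]⟩
        rw [ihres.1]
        simp only [List.length_append, List.length_cons, List.length_nil]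
        omega
      · rw [if_neg h]
        exact ih d qB (fun y hy => hl y (by simp [hy]))

theorem processB_count (g : List (List Int)) (c : Int) (hc : 0 ≤ c) :
    ∀ (F : List Int) (d : List Int) (qB : List Int), validG g d.length →
      (F.foldl (stepB g c) (d, qB)).1.count (-1) + (F.foldl (stepB g c) (d, qB)).2.length =
          d.count (-1) + qB.length ∧
        (F.foldl (stepB g c) (d, qB)).1.length = d.length := by
  intro F
  induction F with
  | nil => intro d qB _; simp
  | cons v F ih =>
      intro d qB hg
      simp only [List.foldl_cons, stepB]
      have hs := relaxB_count c hc (g.getD (pvIdx g.length v) []) d qB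
        (fun x hx => valid_adj hg (pvIdx g.length v) x hx)
      have ihres := ih ((g.getD (pvIdx g.length v) []).foldl (relaxB c) (d, qB)).1
        ((g.getD (pvIdx g.length v) []).foldl (relaxB c) (d, qB)).2 (by rw [hs.2]; exact hg)
      simp only [Prod.mk.eta] at ihres
      refine ⟨?_, by rw [ihres.2, hs.2]⟩
      rw [ihres.1]
      omega

theorem main_lemma (g : List (List Int)) :
    ∀ (m : Nat) (d : List Int) (F : List Int) (c : Int) (fA fB : Nat),
      validG g d.length → 0 ≤ c → d.count (-1) = m → m + F.length ≤ fA → m + 1 ≤ fB →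
        loopA g fA d (F.map (fun v => (v, c))) = loopB g fB d F c := by
  intro m
  induction m using Nat.strong_induction_on with
  | _ m ih =>
    intro d F c fA fB hg hc hm hfA hfB
    cases F with
    | nil => simp [loopA_nil, loopB_nil]
    | cons node F' =>
      obtain ⟨fB', rfl⟩ : ∃ fB', fB = fB' + 1 := ⟨fB - 1, by omega⟩
      have hB : loopB g (fB' + 1) d (node :: F') c =
          loopB g fB' (processB g c d (node :: F')).1 (processB g c d (node :: F')).2 (c + 1) := rfl
      rw [hB]
      have hpop := loopA_pop g ((node :: F').map (fun v => (v, c))) (fA - (node :: F').length) d []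
      rw [List.append_nil] at hpop
      have hfa : ((node :: F').map (fun v => (v, c))).length + (fA - (node :: F').length) = fA := by
        simp only [List.length_map, List.length_cons] at *
        omega
      rw [hfa] at hpop
      rw [hpop]
      have hcorr : processA g d ((node :: F').map (fun v => (v, c))) =
          ((processB g c d (node :: F')).1,
            (processB g c d (node :: F')).2.map (fun v => (v, c + 1))) := by
        simp only [processA, processB]
        simpa using process_corr g c (node :: F') d []
      rw [hcorr]
      simp only [List.nil_append]
      have hcnt := processB_count g c hc (node :: F') d [] hg
      simp only [List.length_nil, Nat.add_zero] at hcnt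
      rw [show (List.foldl (stepB g c) (d, []) (node :: F')) = processB g c d (node :: F')
        from rfl] at hcnt
      rcases hnx : (processB g c d (node :: F')).2 with _ | ⟨w, ws⟩
      · simp [loopA_nil, loopB_nil]
      · have hk : (processB g c d (node :: F')).2.length = ws.length + 1 := by rw [hnx]; simp
        have hm' : (processB g c d (node :: F')).1.count (-1) < m := by
          have := hcnt.1
          simp only [processB] at this hk ⊢
          omega
        rw [← hnx]
        exact ih ((processB g c d (node :: F')).1.count (-1)) hm'
          (processB g c d (node :: F')).1 (processB g c d (node :: F')).2 (c + 1)
          (fA - (node :: F').length) fB'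
          (by rw [hcnt.2]; exact hg) (by omega) rfl
          (by have h1 := hcnt.1; have h2 : (node :: F').length = F'.length + 1 := rfl
              have h3 := hk; omega)
          (by have h1 := hcnt.1; have h2 := hk; omega)

theorem adjAdd_mem {g : List (List Int)} {a b : Int} :
    ∀ adj ∈ adjAdd g a b, ∀ x ∈ adj, (∃ l ∈ g, x ∈ l) ∨ x = b := by
  intro adj hadj x hx
  rcases List.mem_or_eq_of_mem_set hadj with h | rfl
  · exact Or.inl ⟨adj, h, hx⟩
  · rcases List.mem_append.1 hx with h | h
    · by_cases hl : pvIdx g.length a < g.length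
      · rw [List.getD_eq_getElem g [] hl] at h
        exact Or.inl ⟨_, List.getElem_mem hl, h⟩
      · rw [List.getD_eq_default g [] (Nat.le_of_not_lt hl)] at h
        simp at h
    · simp only [List.mem_singleton] at h
      exact Or.inr h

theorem buildGraph_aux (P : Int → Prop) :
    ∀ (roads : List (Int × Int)) (g0 : List (List Int)),
      (∀ adj ∈ g0, ∀ x ∈ adj, P x) → (∀ p ∈ roads, P p.1 ∧ P p.2) →
        ∀ adj ∈ roads.foldl (fun g p => adjAdd (adjAdd g p.1 p.2) p.2 p.1) g0, ∀ x ∈ adj, P x := by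
  intro roads
  induction roads with
  | nil => intro g0 h0 _; simpa using h0
  | cons p roads ih =>
      intro g0 h0 hr
      simp only [List.foldl_cons]
      refine ih (adjAdd (adjAdd g0 p.1 p.2) p.2 p.1) ?_ (fun q hq => hr q (by simp [hq]))
      intro adj hadj x hx
      rcases adjAdd_mem adj hadj x hx with h | rfl
      · obtain ⟨l, hl, hxl⟩ := h
        rcases adjAdd_mem l hl x hxl with h2 | rfl
        · obtain ⟨l2, hl2, hxl2⟩ := h2
          exact h0 l2 hl2 x hxl2
        · exact (hr p (by simp)).2
      · exact (hr p (by simp)).1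

theorem mem_buildGraph {n : Int} {roads : List (Int × Int)}
    (hr : ∀ p ∈ roads, -(n + 1) ≤ p.1 ∧ p.1 ≤ n ∧ -(n + 1) ≤ p.2 ∧ p.2 ≤ n) :
    ∀ adj ∈ buildGraph n roads, ∀ x ∈ adj, -(n + 1) ≤ x ∧ x ≤ n := by
  have base : ∀ adj ∈ List.replicate (n + 1).toNat ([] : List Int), ∀ x ∈ adj,
      -(n + 1) ≤ x ∧ x ≤ n := by
    intro adj hadj x hx
    rw [List.eq_of_mem_replicate hadj] at hx
    simp at hx
  exact buildGraph_aux (fun x => -(n + 1) ≤ x ∧ x ≤ n) roads (List.replicate (n + 1).toNat []) base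
    (fun p hp => ⟨⟨(hr p hp).1, (hr p hp).2.1⟩, ⟨(hr p hp).2.2.1, (hr p hp).2.2.2⟩⟩)

-- ======= NEW: ghost level BFS = synchronous edge rounds =======

-- nodes adjacent (via the road list, read through dist) to the current level set
def EA (d : List Int) (level : Int) (rs : List (Int × Int)) (i : Nat) : Prop :=
  ∃ p ∈ rs, (d.getD (pvIdx d.length p.1) 0 = level ∧ pvIdx d.length p.2 = i) ∨
            (d.getD (pvIdx d.length p.2) 0 = level ∧ pvIdx d.length p.1 = i)

-- nodes adjacent (via the ghost graph) to the frontier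
def NbrF (g : List (List Int)) (L : Nat) (F : List Int) (i : Nat) : Prop :=
  ∃ x ∈ F, ∃ y ∈ g.getD (pvIdx L x) [], pvIdx L y = i

theorem getD_neg_lt {d : List Int} {i : Nat} (h : d.getD i 0 = -1) : i < d.length := by
  by_contra hi
  rw [List.getD_eq_default d 0 (Nat.le_of_not_lt hi)] at h
  omega

theorem getD_set_self (l : List Int) (i : Nat) (v : Int) (h : i < l.length) :
    (l.set i v).getD i 0 = v := by
  simp [List.getD_eq_getElem?_getD, h]

theorem getD_set_ne (l : List Int) (i j : Nat) (v : Int) (h : i ≠ j) :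
    (l.set i v).getD j 0 = l.getD j 0 := by
  simp [List.getD_eq_getElem?_getD, List.getElem?_set_ne h]

theorem eq_of_getD {a b : List Int} (hlen : a.length = b.length)
    (h : ∀ i, a.getD i 0 = b.getD i 0) : a = b := by
  apply List.ext_getElem hlen
  intro i h1 h2
  have := h i
  rwa [List.getD_eq_getElem a 0 h1, List.getD_eq_getElem b 0 h2] at this

theorem EA_cons (d : List Int) (level : Int) (p : Int × Int) (rs : List (Int × Int)) (i : Nat) :
    EA d level (p :: rs) i ↔
      ((d.getD (pvIdx d.length p.1) 0 = level ∧ pvIdx d.length p.2 = i) ∨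
        (d.getD (pvIdx d.length p.2) 0 = level ∧ pvIdx d.length p.1 = i)) ∨ EA d level rs i := by
  constructor
  · rintro ⟨q, hq, hcase⟩
    rcases List.mem_cons.1 hq with rfl | hrs
    · exact Or.inl hcase
    · exact Or.inr ⟨q, hrs, hcase⟩
  · rintro (hcase | ⟨q, hrs, hcase⟩)
    · exact ⟨p, List.mem_cons_self .., hcase⟩
    · exact ⟨q, List.mem_cons_of_mem _ hrs, hcase⟩

-- characterization of one synchronous round relative to an arbitrary accumulator
theorem sync_char (d : List Int) (level : Int) (hl0 : 0 ≤ level) :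
    ∀ (rs : List (Int × Int)) (nd : List Int) (ch : Bool), nd.length = d.length →
      (rs.foldl (syncEdge d level) (nd, ch)).1.length = d.length ∧
      (∀ i, (d.getD i 0 = -1 ∧ EA d level rs i →
          (rs.foldl (syncEdge d level) (nd, ch)).1.getD i 0 = level + 1) ∧
        (¬(d.getD i 0 = -1 ∧ EA d level rs i) →
          (rs.foldl (syncEdge d level) (nd, ch)).1.getD i 0 = nd.getD i 0)) ∧
      ((rs.foldl (syncEdge d level) (nd, ch)).2 = true ↔
        ch = true ∨ ∃ i, d.getD i 0 = -1 ∧ EA d level rs i) := by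
  intro rs
  induction rs with
  | nil =>
      intro nd ch hnd
      refine ⟨hnd, ?_, ?_⟩
      · intro i
        exact ⟨fun h => absurd h.2 (by rintro ⟨q, hq, -⟩; simp at hq), fun _ => rfl⟩
      · simp only [List.foldl_nil]
        constructor
        · intro h; exact Or.inl h
        · rintro (h | ⟨i, -, q, hq, -⟩)
          · exact h
          · simp at hq
  | cons p rs ih =>
      intro nd ch hnd
      simp only [List.foldl_cons, syncEdge]
      by_cases hc1 : d.getD (pvIdx d.length p.1) 0 = level ∧ d.getD (pvIdx d.length p.2) 0 = -1
      · rw [if_pos hc1]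
        have hc2 : ¬(d.getD (pvIdx d.length p.2) 0 = level ∧
            d.getD (pvIdx d.length p.1) 0 = -1) := by
          rintro ⟨h1, -⟩
          rw [hc1.2] at h1
          omega
        rw [if_neg hc2]
        have hblt : pvIdx d.length p.2 < d.length := getD_neg_lt hc1.2
        have hnd' : (nd.set (pvIdx nd.length p.2) (level + 1)).length = d.length := by
          simp [hnd]
        obtain ⟨IH1, IH2, IH3⟩ := ih (nd.set (pvIdx nd.length p.2) (level + 1)) true hnd'
        rw [hnd] at IH1 IH2 IH3 ⊢
        refine ⟨IH1, ?_, ?_⟩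
        · intro i
          constructor
          · rintro ⟨hdi, hea⟩
            rcases (EA_cons d level p rs i).1 hea with (⟨-, hbi⟩ | ⟨hlb, -⟩) | hrs
            · -- i = pvIdx d.length p.2: value written into nd
              by_cases hrs' : EA d level rs i
              · exact (IH2 i).1 ⟨hdi, hrs'⟩
              · rw [(IH2 i).2 (fun hc => hrs' hc.2), ← hbi,
                  getD_set_self _ _ _ (by rw [hnd]; exact hblt)]
            · rw [hc1.2] at hlb
              omega
            · exact (IH2 i).1 ⟨hdi, hrs⟩
          · intro hnc
            have hib : i ≠ pvIdx d.length p.2 := by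
              intro e
              exact hnc ⟨e ▸ hc1.2, (EA_cons d level p rs i).2 (Or.inl (Or.inl ⟨hc1.1, e.symm⟩))⟩
            have := (IH2 i).2 (fun hc =>
              hnc ⟨hc.1, (EA_cons d level p rs i).2 (Or.inr hc.2)⟩)
            rw [this, getD_set_ne nd (pvIdx d.length p.2) i (level + 1)
              (fun e => hib e.symm)]
        · rw [IH3]
          constructor
          · intro _
            exact Or.inr ⟨pvIdx d.length p.2, hc1.2,
              (EA_cons d level p rs _).2 (Or.inl (Or.inl ⟨hc1.1, rfl⟩))⟩
          · intro _
            exact Or.inl rfl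
      · by_cases hc2 : d.getD (pvIdx d.length p.2) 0 = level ∧
            d.getD (pvIdx d.length p.1) 0 = -1
        · rw [if_neg hc1, if_pos hc2]
          have halt : pvIdx d.length p.1 < d.length := getD_neg_lt hc2.2
          have hnd' : (nd.set (pvIdx nd.length p.1) (level + 1)).length = d.length := by
            simp [hnd]
          obtain ⟨IH1, IH2, IH3⟩ := ih (nd.set (pvIdx nd.length p.1) (level + 1)) true hnd'
          rw [hnd] at IH1 IH2 IH3 ⊢
          refine ⟨IH1, ?_, ?_⟩
          · intro i
            constructor
            · rintro ⟨hdi, hea⟩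
              rcases (EA_cons d level p rs i).1 hea with (⟨hla, -⟩ | ⟨-, hai⟩) | hrs
              · rw [hc2.2] at hla
                omega
              · by_cases hrs' : EA d level rs i
                · exact (IH2 i).1 ⟨hdi, hrs'⟩
                · rw [(IH2 i).2 (fun hc => hrs' hc.2), ← hai,
                    getD_set_self _ _ _ (by rw [hnd]; exact halt)]
              · exact (IH2 i).1 ⟨hdi, hrs⟩
            · intro hnc
              have hia : i ≠ pvIdx d.length p.1 := by
                intro e
                exact hnc ⟨e ▸ hc2.2,
                  (EA_cons d level p rs i).2 (Or.inl (Or.inr ⟨hc2.1, e.symm⟩))⟩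
              have := (IH2 i).2 (fun hc =>
                hnc ⟨hc.1, (EA_cons d level p rs i).2 (Or.inr hc.2)⟩)
              rw [this, getD_set_ne nd (pvIdx d.length p.1) i (level + 1)
                (fun e => hia e.symm)]
          · rw [IH3]
            constructor
            · intro _
              exact Or.inr ⟨pvIdx d.length p.1, hc2.2,
                (EA_cons d level p rs _).2 (Or.inl (Or.inr ⟨hc2.1, rfl⟩))⟩
            · intro _
              exact Or.inl rfl
        · rw [if_neg hc1, if_neg hc2]
          obtain ⟨IH1, IH2, IH3⟩ := ih nd ch hnd
          have hkill : ∀ i, d.getD i 0 = -1 → EA d level (p :: rs) i → EA d level rs i := by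
            intro i hdi hea
            rcases (EA_cons d level p rs i).1 hea with (⟨hla, hbi⟩ | ⟨hlb, hai⟩) | hrs
            · exact absurd ⟨hla, hbi ▸ hdi⟩ hc1
            · exact absurd ⟨hlb, hai ▸ hdi⟩ hc2
            · exact hrs
          refine ⟨IH1, ?_, ?_⟩
          · intro i
            constructor
            · rintro ⟨hdi, hea⟩
              exact (IH2 i).1 ⟨hdi, hkill i hdi hea⟩
            · intro hnc
              exact (IH2 i).2 (fun hc =>
                hnc ⟨hc.1, (EA_cons d level p rs i).2 (Or.inr hc.2)⟩)
          · rw [IH3]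
            constructor
            · rintro (h | ⟨i, hdi, hrs⟩)
              · exact Or.inl h
              · exact Or.inr ⟨i, hdi, (EA_cons d level p rs i).2 (Or.inr hrs)⟩
            · rintro (h | ⟨i, hdi, hea⟩)
              · exact Or.inl h
              · exact Or.inr ⟨i, hdi, hkill i hdi hea⟩

-- characterization of one ghost inner pass over a neighbor list
theorem relaxB_char (level : Int) (hl0 : 0 ≤ level) :
    ∀ (l : List Int) (da : List Int) (qa : List Int),
      (l.foldl (relaxB level) (da, qa)).1.length = da.length ∧
      (∀ i, (da.getD i 0 = -1 ∧ (∃ y ∈ l, pvIdx da.length y = i) →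
          (l.foldl (relaxB level) (da, qa)).1.getD i 0 = level + 1) ∧
        (¬(da.getD i 0 = -1 ∧ ∃ y ∈ l, pvIdx da.length y = i) →
          (l.foldl (relaxB level) (da, qa)).1.getD i 0 = da.getD i 0)) ∧
      (∀ i, (∃ z ∈ (l.foldl (relaxB level) (da, qa)).2, pvIdx da.length z = i) ↔
        (∃ z ∈ qa, pvIdx da.length z = i) ∨
          (da.getD i 0 = -1 ∧ ∃ y ∈ l, pvIdx da.length y = i)) ∧
      (∀ z ∈ (l.foldl (relaxB level) (da, qa)).2, z ∈ qa ∨ z ∈ l) := by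
  intro l
  induction l with
  | nil =>
      intro da qa
      refine ⟨rfl, ?_, ?_, ?_⟩
      · intro i
        exact ⟨fun h => absurd h.2 (by simp), fun _ => rfl⟩
      · intro i; simp
      · intro z hz; exact Or.inl hz
  | cons x l ih =>
      intro da qa
      simp only [List.foldl_cons, relaxB]
      by_cases h : da.getD (pvIdx da.length x) 0 = -1
      · rw [if_pos h]
        have hjlt : pvIdx da.length x < da.length := getD_neg_lt h
        have hlen1 : (da.set (pvIdx da.length x) (level + 1)).length = da.length := by simp
        obtain ⟨IH1, IH2, IH3, IH4⟩ := ih (da.set (pvIdx da.length x) (level + 1)) (qa ++ [x])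
        rw [hlen1] at IH1 IH2 IH3
        refine ⟨IH1, ?_, ?_, ?_⟩
        · intro i
          constructor
          · rintro ⟨hda, y, hy, hyi⟩
            by_cases hij : i = pvIdx da.length x
            · have := (IH2 i).2 (by
                rintro ⟨hc, -⟩
                rw [hij, getD_set_self _ _ _ hjlt] at hc
                omega)
              rw [this, hij, getD_set_self _ _ _ hjlt]
            · have hd1 : (da.set (pvIdx da.length x) (level + 1)).getD i 0 = da.getD i 0 :=
                getD_set_ne _ _ _ _ (fun e => hij e.symm)
              rcases List.mem_cons.1 hy with rfl | hyl
              · exact absurd hyi.symm hij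
              · exact (IH2 i).1 ⟨by rw [hd1]; exact hda, y, hyl, hyi⟩
          · intro hnc
            by_cases hij : i = pvIdx da.length x
            · exact absurd ⟨hij ▸ h, x, List.mem_cons_self .., hij ▸ rfl⟩ hnc
            · have hd1 : (da.set (pvIdx da.length x) (level + 1)).getD i 0 = da.getD i 0 :=
                getD_set_ne _ _ _ _ (fun e => hij e.symm)
              have := (IH2 i).2 (by
                rintro ⟨h1, y, hyl, hyi⟩
                exact hnc ⟨by rw [← hd1]; exact h1, y, List.mem_cons_of_mem _ hyl, hyi⟩)
              rw [this, hd1]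
        · intro i
          constructor
          · intro hL
            rcases (IH3 i).1 hL with ⟨z, hz, hzi⟩ | ⟨hd1, y, hyl, hyi⟩
            · rcases List.mem_append.1 hz with hzq | hzx
              · exact Or.inl ⟨z, hzq, hzi⟩
              · have : z = x := List.mem_singleton.1 hzx
                subst this
                exact Or.inr ⟨hzi ▸ h, z, List.mem_cons_self .., hzi⟩
            · have hij : i ≠ pvIdx da.length x := by
                intro e
                rw [e, getD_set_self _ _ _ hjlt] at hd1
                omega
              have hd : da.getD i 0 = -1 := by
                rw [← getD_set_ne da (pvIdx da.length x) i (level + 1) (fun e => hij e.symm)]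
                exact hd1
              exact Or.inr ⟨hd, y, List.mem_cons_of_mem _ hyl, hyi⟩
          · intro hR
            apply (IH3 i).2
            rcases hR with ⟨z, hz, hzi⟩ | ⟨hda, y, hy, hyi⟩
            · exact Or.inl ⟨z, List.mem_append_left _ hz, hzi⟩
            · rcases List.mem_cons.1 hy with rfl | hyl
              · exact Or.inl ⟨y, List.mem_append_right _ (List.mem_singleton.2 rfl), hyi⟩
              · by_cases hij : i = pvIdx da.length x
                · exact Or.inl ⟨x, List.mem_append_right _ (List.mem_singleton.2 rfl), hij ▸ rfl⟩
                · refine Or.inr ⟨?_, y, hyl, hyi⟩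
                  rw [getD_set_ne da (pvIdx da.length x) i (level + 1) (fun e => hij e.symm)]
                  exact hda
        · intro z hz
          rcases IH4 z hz with hq | hl'
          · rcases List.mem_append.1 hq with h1 | h2
            · exact Or.inl h1
            · exact Or.inr (List.mem_singleton.1 h2 ▸ List.mem_cons_self ..)
          · exact Or.inr (List.mem_cons_of_mem _ hl')
      · rw [if_neg h]
        obtain ⟨IH1, IH2, IH3, IH4⟩ := ih da qa
        refine ⟨IH1, ?_, ?_, fun z hz => (IH4 z hz).imp id (List.mem_cons_of_mem _)⟩
        · intro i
          constructor
          · rintro ⟨hda, y, hy, hyi⟩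
            rcases List.mem_cons.1 hy with rfl | hyl
            · exact absurd (hyi ▸ hda) h
            · exact (IH2 i).1 ⟨hda, y, hyl, hyi⟩
          · intro hnc
            exact (IH2 i).2 (by
              rintro ⟨h1, y, hyl, hyi⟩
              exact hnc ⟨h1, y, List.mem_cons_of_mem _ hyl, hyi⟩)
        · intro i
          rw [IH3 i]
          constructor
          · rintro (hq | ⟨hda, y, hyl, hyi⟩)
            · exact Or.inl hq
            · exact Or.inr ⟨hda, y, List.mem_cons_of_mem _ hyl, hyi⟩
          · rintro (hq | ⟨hda, y, hy, hyi⟩)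
            · exact Or.inl hq
            · rcases List.mem_cons.1 hy with rfl | hyl
              · exact absurd (hyi ▸ hda) h
              · exact Or.inr ⟨hda, y, hyl, hyi⟩

theorem NbrF_cons (g : List (List Int)) (L : Nat) (x : Int) (F : List Int) (i : Nat) :
    NbrF g L (x :: F) i ↔ (∃ y ∈ g.getD (pvIdx L x) [], pvIdx L y = i) ∨ NbrF g L F i := by
  constructor
  · rintro ⟨x', hx', y, hy, hyi⟩
    rcases List.mem_cons.1 hx' with rfl | hF
    · exact Or.inl ⟨y, hy, hyi⟩
    · exact Or.inr ⟨x', hF, y, hy, hyi⟩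
  · rintro (⟨y, hy, hyi⟩ | ⟨x', hF, y, hy, hyi⟩)
    · exact ⟨x, List.mem_cons_self .., y, hy, hyi⟩
    · exact ⟨x', List.mem_cons_of_mem _ hF, y, hy, hyi⟩

-- characterization of one ghost frontier pass
theorem stepB_char (g : List (List Int)) (level : Int) (hl0 : 0 ≤ level) :
    ∀ (F : List Int) (da : List Int) (qa : List Int), g.length = da.length →
      (F.foldl (stepB g level) (da, qa)).1.length = da.length ∧
      (∀ i, (da.getD i 0 = -1 ∧ NbrF g da.length F i →
          (F.foldl (stepB g level) (da, qa)).1.getD i 0 = level + 1) ∧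
        (¬(da.getD i 0 = -1 ∧ NbrF g da.length F i) →
          (F.foldl (stepB g level) (da, qa)).1.getD i 0 = da.getD i 0)) ∧
      (∀ i, (∃ z ∈ (F.foldl (stepB g level) (da, qa)).2, pvIdx da.length z = i) ↔
        (∃ z ∈ qa, pvIdx da.length z = i) ∨
          (da.getD i 0 = -1 ∧ NbrF g da.length F i)) ∧
      (∀ z ∈ (F.foldl (stepB g level) (da, qa)).2,
        z ∈ qa ∨ ∃ x ∈ F, z ∈ g.getD (pvIdx da.length x) []) := by
  intro F
  induction F with
  | nil =>
      intro da qa _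
      refine ⟨rfl, ?_, ?_, fun z hz => Or.inl hz⟩
      · intro i
        exact ⟨fun h => absurd h.2 (by rintro ⟨x, hx, -⟩; simp at hx), fun _ => rfl⟩
      · intro i
        simp only [List.foldl_nil]
        constructor
        · intro h; exact Or.inl h
        · rintro (h | ⟨-, x, hx, -⟩)
          · exact h
          · simp at hx
  | cons x F' ih =>
      intro da qa hg
      simp only [List.foldl_cons, stepB]
      rw [show pvIdx g.length x = pvIdx da.length x from by rw [hg]]
      obtain ⟨R1, R2, R3, R4⟩ :=
        relaxB_char level hl0 (g.getD (pvIdx da.length x) []) da qa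
      have hg1 : g.length =
          ((g.getD (pvIdx da.length x) []).foldl (relaxB level) (da, qa)).1.length := by
        rw [R1, hg]
      obtain ⟨IH1, IH2, IH3, IH4⟩ := ih
        ((g.getD (pvIdx da.length x) []).foldl (relaxB level) (da, qa)).1
        ((g.getD (pvIdx da.length x) []).foldl (relaxB level) (da, qa)).2 hg1
      rw [R1] at IH1 IH2 IH3 IH4
      refine ⟨IH1, ?_, ?_, ?_⟩
      · intro i
        constructor
        · rintro ⟨hda, hnbr⟩
          by_cases hd1 : ((g.getD (pvIdx da.length x) []).foldl (relaxB level) (da, qa)).1.getD i 0 = -1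
          · have hnl : ¬∃ y ∈ g.getD (pvIdx da.length x) [], pvIdx da.length y = i := by
              intro hy
              rw [(R2 i).1 ⟨hda, hy⟩] at hd1
              omega
            rcases (NbrF_cons g da.length x F' i).1 hnbr with hy | hF'
            · exact absurd hy hnl
            · exact (IH2 i).1 ⟨hd1, hF'⟩
          · have hyl : ∃ y ∈ g.getD (pvIdx da.length x) [], pvIdx da.length y = i := by
              by_contra hny
              exact hd1 (by rw [(R2 i).2 (fun hc => hny hc.2)]; exact hda)
            have := (IH2 i).2 (fun hc => hd1 hc.1)
            rw [this, (R2 i).1 ⟨hda, hyl⟩]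
        · intro hnc
          have hno : ¬(da.getD i 0 = -1 ∧ ∃ y ∈ g.getD (pvIdx da.length x) [], pvIdx da.length y = i) := by
            rintro ⟨h1, hy⟩
            exact hnc ⟨h1, (NbrF_cons g da.length x F' i).2 (Or.inl hy)⟩
          have hd1 := (R2 i).2 hno
          have := (IH2 i).2 (by
            rintro ⟨h1, hF'⟩
            rw [hd1] at h1
            exact hnc ⟨h1, (NbrF_cons g da.length x F' i).2 (Or.inr hF')⟩)
          rw [this, hd1]
      · intro i
        constructor
        · intro hL
          rcases (IH3 i).1 hL with hq1 | ⟨hd1, hF'⟩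
          · rcases (R3 i).1 hq1 with hqa | ⟨hda, hy⟩
            · exact Or.inl hqa
            · exact Or.inr ⟨hda, (NbrF_cons g da.length x F' i).2 (Or.inl hy)⟩
          · by_cases hxy : da.getD i 0 = -1 ∧ ∃ y ∈ g.getD (pvIdx da.length x) [], pvIdx da.length y = i
            · rw [(R2 i).1 hxy] at hd1
              omega
            · rw [(R2 i).2 hxy] at hd1
              exact Or.inr ⟨hd1, (NbrF_cons g da.length x F' i).2 (Or.inr hF')⟩
        · intro hR
          apply (IH3 i).2
          rcases hR with hqa | ⟨hda, hnbr⟩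
          · exact Or.inl ((R3 i).2 (Or.inl hqa))
          · rcases (NbrF_cons g da.length x F' i).1 hnbr with hy | hF'
            · exact Or.inl ((R3 i).2 (Or.inr ⟨hda, hy⟩))
            · by_cases hxy : ∃ y ∈ g.getD (pvIdx da.length x) [], pvIdx da.length y = i
              · exact Or.inl ((R3 i).2 (Or.inr ⟨hda, hxy⟩))
              · refine Or.inr ⟨?_, hF'⟩
                rw [(R2 i).2 (fun hc => hxy hc.2)]
                exact hda
      · intro z hz
        rcases IH4 z hz with hq1 | ⟨x', hx', hzg⟩
        · rcases R4 z hq1 with hqa | hzl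
          · exact Or.inl hqa
          · exact Or.inr ⟨x, List.mem_cons_self .., hzl⟩
        · exact Or.inr ⟨x', List.mem_cons_of_mem _ hx', hzg⟩

theorem getDset_self {α : Type} (l : List α) (i : Nat) (v dflt : α) (h : i < l.length) :
    (l.set i v).getD i dflt = v := by
  simp [List.getD_eq_getElem?_getD, h]

theorem getDset_ne {α : Type} (l : List α) (i j : Nat) (v dflt : α) (h : i ≠ j) :
    (l.set i v).getD j dflt = l.getD j dflt := by
  simp [List.getD_eq_getElem?_getD, List.getElem?_set_ne h]

theorem adjAdd_length (g : List (List Int)) (a b : Int) : (adjAdd g a b).length = g.length := by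
  simp [adjAdd]

theorem mem_adjAdd_iff (g : List (List Int)) (a b : Int) (ha : pvIdx g.length a < g.length) :
    ∀ j y, y ∈ (adjAdd g a b).getD j [] ↔
      y ∈ g.getD j [] ∨ (j = pvIdx g.length a ∧ y = b) := by
  intro j y
  unfold adjAdd
  by_cases hj : j = pvIdx g.length a
  · subst hj
    rw [getDset_self _ _ _ _ ha]
    simp [List.mem_append]
  · rw [getDset_ne _ _ _ _ _ (fun e => hj e.symm)]
    simp [hj]

theorem mem_foldAdj :
    ∀ (rs : List (Int × Int)) (g0 : List (List Int)),
      (∀ p ∈ rs, pvIdx g0.length p.1 < g0.length ∧ pvIdx g0.length p.2 < g0.length) →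
      (rs.foldl (fun g p => adjAdd (adjAdd g p.1 p.2) p.2 p.1) g0).length = g0.length ∧
      ∀ j y, y ∈ (rs.foldl (fun g p => adjAdd (adjAdd g p.1 p.2) p.2 p.1) g0).getD j [] ↔
        y ∈ g0.getD j [] ∨ ∃ p ∈ rs,
          (pvIdx g0.length p.1 = j ∧ p.2 = y) ∨ (pvIdx g0.length p.2 = j ∧ p.1 = y) := by
  intro rs
  induction rs with
  | nil =>
      intro g0 _
      refine ⟨rfl, fun j y => ?_⟩
      simp
  | cons p rs ih =>
      intro g0 hb
      have hp := hb p (List.mem_cons_self ..)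
      have hlen1 : (adjAdd g0 p.1 p.2).length = g0.length := adjAdd_length g0 p.1 p.2
      have hlen2 : (adjAdd (adjAdd g0 p.1 p.2) p.2 p.1).length = g0.length := by
        rw [adjAdd_length, hlen1]
      simp only [List.foldl_cons]
      obtain ⟨IH1, IH2⟩ := ih (adjAdd (adjAdd g0 p.1 p.2) p.2 p.1)
        (by rw [hlen2]; exact fun q hq => hb q (List.mem_cons_of_mem _ hq))
      rw [hlen2] at IH1 IH2
      refine ⟨IH1, fun j y => ?_⟩
      rw [IH2 j y]
      have hm2 : ∀ y', y' ∈ (adjAdd (adjAdd g0 p.1 p.2) p.2 p.1).getD j [] ↔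
          y' ∈ g0.getD j [] ∨ (j = pvIdx g0.length p.1 ∧ y' = p.2) ∨
            (j = pvIdx g0.length p.2 ∧ y' = p.1) := by
        intro y'
        rw [mem_adjAdd_iff (adjAdd g0 p.1 p.2) p.2 p.1 (by rw [hlen1]; exact hp.2),
          hlen1, mem_adjAdd_iff g0 p.1 p.2 hp.1]
        tauto
      rw [hm2 y]
      constructor
      · rintro ((hy | ⟨hj, hy⟩ | ⟨hj, hy⟩) | ⟨q, hq, hcase⟩)
        · exact Or.inl hy
        · exact Or.inr ⟨p, List.mem_cons_self .., Or.inl ⟨hj.symm, hy.symm⟩⟩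
        · exact Or.inr ⟨p, List.mem_cons_self .., Or.inr ⟨hj.symm, hy.symm⟩⟩
        · exact Or.inr ⟨q, List.mem_cons_of_mem _ hq, hcase⟩
      · rintro (hy | ⟨q, hq, hcase⟩)
        · exact Or.inl (Or.inl hy)
        · rcases List.mem_cons.1 hq with rfl | hqrs
          · rcases hcase with ⟨hj, hy⟩ | ⟨hj, hy⟩
            · exact Or.inl (Or.inr (Or.inl ⟨hj.symm, hy.symm⟩))
            · exact Or.inl (Or.inr (Or.inr ⟨hj.symm, hy.symm⟩))
          · exact Or.inr ⟨q, hqrs, hcase⟩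

-- the ghost graph's adjacency is exactly the road list's (both read through pvIdx)
theorem buildGraph_char {n : Int} {roads : List (Int × Int)} (hn : 0 ≤ n)
    (hr : ∀ p ∈ roads, -(n + 1) ≤ p.1 ∧ p.1 ≤ n ∧ -(n + 1) ≤ p.2 ∧ p.2 ≤ n) :
    (buildGraph n roads).length = (n + 1).toNat ∧
    ∀ j y, y ∈ (buildGraph n roads).getD j [] ↔
      ∃ p ∈ roads, (pvIdx (n + 1).toNat p.1 = j ∧ p.2 = y) ∨
        (pvIdx (n + 1).toNat p.2 = j ∧ p.1 = y) := by
  have hb : ∀ p ∈ roads, pvIdx (List.replicate (n + 1).toNat ([] : List Int)).length p.1 <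
      (List.replicate (n + 1).toNat ([] : List Int)).length ∧
      pvIdx (List.replicate (n + 1).toNat ([] : List Int)).length p.2 <
        (List.replicate (n + 1).toNat ([] : List Int)).length := by
    intro p hp
    have h1 := hr p hp
    simp only [List.length_replicate]
    unfold pvIdx
    constructor <;> (split_ifs <;> omega)
  obtain ⟨H1, H2⟩ := mem_foldAdj roads (List.replicate (n + 1).toNat []) hb
  rw [List.length_replicate] at H1 H2
  refine ⟨H1, fun j y => ?_⟩
  rw [show (buildGraph n roads) =
    roads.foldl (fun g p => adjAdd (adjAdd g p.1 p.2) p.2 p.1)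
      (List.replicate (n + 1).toNat []) from rfl, H2 j y]
  have hrep : (List.replicate (n + 1).toNat ([] : List Int)).getD j [] = [] := by
    rcases Nat.lt_or_ge j (n + 1).toNat with h | h
    · rw [List.getD_eq_getElem _ _ (by simpa using h)]
      simp
    · rw [List.getD_eq_default _ _ (by simpa using h)]
  rw [hrep]
  simp

-- the frontier invariant: d has length L, values in [-1, level], the nodes at value 'level'
-- are exactly the frontier's indices, and frontier indices are in range
def BfsInv (L : Nat) (d : List Int) (F : List Int) (level : Int) : Prop :=
  d.length = L ∧ 0 ≤ level ∧
  (∀ i, i < L → (d.getD i 0 = level ↔ ∃ x ∈ F, pvIdx L x = i)) ∧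
  (∀ i, i < L → -1 ≤ d.getD i 0 ∧ d.getD i 0 ≤ level) ∧
  (∀ x ∈ F, pvIdx L x < L)

theorem bridge (g : List (List Int)) (roads : List (Int × Int)) (L : Nat)
    (hgL : g.length = L)
    (hroads : ∀ p ∈ roads, pvIdx L p.1 < L ∧ pvIdx L p.2 < L)
    (hvg : validG g L)
    (hG : ∀ j y, y ∈ g.getD j [] ↔
      ∃ p ∈ roads, (pvIdx L p.1 = j ∧ p.2 = y) ∨ (pvIdx L p.2 = j ∧ p.1 = y)) :
    ∀ (m : Nat) (d F : List Int) (level : Int) (fB fS : Nat),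
      BfsInv L d F level → d.count (-1) = m → m + 1 ≤ fB → m + 2 ≤ fS →
      loopB g fB d F level = loopS roads fS d level := by
  intro m
  induction m using Nat.strong_induction_on with
  | _ m ih =>
    intro d F level fB fS hInv hm hfB hfS
    obtain ⟨hdL, hl0, H1, H2, H3⟩ := hInv
    obtain ⟨fS', rfl⟩ : ∃ fS', fS = fS' + 1 := ⟨fS - 1, by omega⟩
    -- under the invariant, edge-adjacency to the level set = graph-adjacency to the frontier
    have hEN : ∀ i, EA d level roads i ↔ NbrF g L F i := by
      intro i
      constructor
      · rintro ⟨p, hp, ⟨hda, hbi⟩ | ⟨hdb, hai⟩⟩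
        · rw [hdL] at hda hbi
          obtain ⟨x, hx, hxi⟩ := (H1 (pvIdx L p.1) (hroads p hp).1).1 hda
          exact ⟨x, hx, p.2, by
            rw [hxi]
            exact (hG (pvIdx L p.1) p.2).2 ⟨p, hp, Or.inl ⟨rfl, rfl⟩⟩, hbi⟩
        · rw [hdL] at hdb hai
          obtain ⟨x, hx, hxi⟩ := (H1 (pvIdx L p.2) (hroads p hp).2).1 hdb
          exact ⟨x, hx, p.1, by
            rw [hxi]
            exact (hG (pvIdx L p.2) p.1).2 ⟨p, hp, Or.inr ⟨rfl, rfl⟩⟩, hai⟩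
      · rintro ⟨x, hx, y, hy, hyi⟩
        rcases (hG (pvIdx L x) y).1 hy with ⟨p, hp, ⟨ha, hb⟩ | ⟨ha, hb⟩⟩
        · refine ⟨p, hp, Or.inl ⟨?_, ?_⟩⟩
          · rw [hdL, ha]
            exact (H1 (pvIdx L x) (H3 x hx)).2 ⟨x, hx, rfl⟩
          · rw [hdL, hb]
            exact hyi
        · refine ⟨p, hp, Or.inr ⟨?_, ?_⟩⟩
          · rw [hdL, ha]
            exact (H1 (pvIdx L x) (H3 x hx)).2 ⟨x, hx, rfl⟩
          · rw [hdL, hb]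
            exact hyi
    obtain ⟨S1, S2, S3⟩ := sync_char d level hl0 roads d false rfl
    rw [show roads.foldl (syncEdge d level) (d, false) = syncRound roads level d from rfl]
      at S1 S2 S3
    have hSdef : loopS roads (fS' + 1) d level =
        if (syncRound roads level d).2 then
          loopS roads fS' (syncRound roads level d).1 (level + 1)
        else (syncRound roads level d).1 := rfl
    cases F with
    | nil =>
        rw [loopB_nil, hSdef]
        have hnoEA : ∀ i, ¬(d.getD i 0 = -1 ∧ EA d level roads i) := by
          rintro i ⟨-, hea⟩
          obtain ⟨x, hx, -⟩ := (hEN i).1 hea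
          simp at hx
        have hflag : (syncRound roads level d).2 = false := by
          cases hfl : (syncRound roads level d).2
          · rfl
          · obtain ⟨i, hdi, hea⟩ := (S3.1 hfl).resolve_left (by simp)
            exact absurd ⟨hdi, hea⟩ (hnoEA i)
        rw [hflag, if_neg (by simp)]
        exact (eq_of_getD (by rw [S1]) (fun i => (S2 i).2 (hnoEA i))).symm
    | cons node F' =>
        obtain ⟨fB', rfl⟩ : ∃ fB', fB = fB' + 1 := ⟨fB - 1, by omega⟩
        have hBdef : loopB g (fB' + 1) d (node :: F') level =
            loopB g fB' ((node :: F').foldl (stepB g level) (d, [])).1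
              ((node :: F').foldl (stepB g level) (d, [])).2 (level + 1) := rfl
        obtain ⟨T1, T2, T3, T4⟩ := stepB_char g level hl0 (node :: F') d []
          (by rw [hdL, hgL])
        rw [hdL] at T1 T2 T3 T4
        have hcondiff : ∀ i, (d.getD i 0 = -1 ∧ EA d level roads i) ↔
            (d.getD i 0 = -1 ∧ NbrF g L (node :: F') i) := by
          intro i
          rw [hEN i]
        have heq : (syncRound roads level d).1 =
            ((node :: F').foldl (stepB g level) (d, [])).1 := by
          apply eq_of_getD (by rw [S1, T1, hdL])
          intro i
          by_cases hc : d.getD i 0 = -1 ∧ NbrF g L (node :: F') i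
          · rw [(S2 i).1 ((hcondiff i).2 hc), (T2 i).1 hc]
          · rw [(S2 i).2 (fun h => hc ((hcondiff i).1 h)), (T2 i).2 hc]
        have hcnt := processB_count g level hl0 (node :: F') d []
          (by rw [hdL]; exact hvg)
        simp only [List.length_nil, Nat.add_zero] at hcnt
        rw [hBdef, hSdef]
        rcases hnx : ((node :: F').foldl (stepB g level) (d, [])).2 with - | ⟨w, ws⟩
        · -- frontier exhausted: the sync round changes nothing and reports no change
          rw [hnx] at T3
          have hflag : (syncRound roads level d).2 = false := by
            cases hfl : (syncRound roads level d).2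
            · rfl
            · obtain ⟨i, hdi, hea⟩ := (S3.1 hfl).resolve_left (by simp)
              obtain ⟨z, hz, -⟩ := (T3 i).2 (Or.inr ⟨hdi, (hEN i).1 hea⟩)
              simp at hz
          rw [hflag, if_neg (by simp), loopB_nil, heq]
        · -- frontier nonempty: the sync round reports a change; recurse
          rw [hnx] at T3 T4 hcnt
          have hflag : (syncRound roads level d).2 = true := by
            rcases (T3 (pvIdx L w)).1 ⟨w, List.mem_cons_self .., rfl⟩ with
              ⟨z, hz, -⟩ | ⟨hdi, hnbr⟩
            · simp at hz
            · exact S3.2 (Or.inr ⟨pvIdx L w, hdi, (hEN (pvIdx L w)).2 hnbr⟩)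
          rw [hflag, if_pos (by simp), heq]
          have hm' : (((node :: F').foldl (stepB g level) (d, [])).1).count (-1) < m := by
            have h1 := hcnt.1
            have h2 : (w :: ws).length = ws.length + 1 := by simp
            omega
          apply ih ((((node :: F').foldl (stepB g level) (d, [])).1).count (-1)) hm'
          · -- re-establish the invariant one level up
            refine ⟨by rw [T1], by omega, ?_, ?_, ?_⟩
            · intro i hiL
              constructor
              · intro hv
                by_cases hc : d.getD i 0 = -1 ∧ NbrF g L (node :: F') i
                · exact (T3 i).2 (Or.inr hc)
                · rw [(T2 i).2 hc] at hv
                  have := (H2 i hiL).2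
                  omega
              · rintro ⟨x, hx, hxi⟩
                rcases (T3 i).1 ⟨x, hx, hxi⟩ with ⟨z, hz, -⟩ | hc
                · simp at hz
                · exact (T2 i).1 hc
            · intro i hiL
              by_cases hc : d.getD i 0 = -1 ∧ NbrF g L (node :: F') i
              · rw [(T2 i).1 hc]
                omega
              · rw [(T2 i).2 hc]
                have := H2 i hiL
                omega
            · intro z hz
              rcases T4 z hz with hz0 | ⟨x, -, hzg⟩
              · simp at hz0
              · exact valid_adj hvg _ z hzg
          · rfl
          · have h1 := hcnt.1
            have h2 : (w :: ws).length = ws.length + 1 := by simp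
            omega
          · have h1 := hcnt.1
            have h2 : (w :: ws).length = ws.length + 1 := by simp
            omega

-- ===== VERDICT (by name: the statement is the Claim_ definition above) =====
theorem solution_spec : Claim_equal_solution := by
  intro n roads sources destination _hdom hpre
  obtain ⟨hn, hroads, _hsrc, hdest0, hdestn⟩ := hpre
  unfold Spec_solution
  simp only [solution, solution_alt]
  have hdlt : pvIdx (n + 1).toNat destination < (n + 1).toNat := by
    unfold pvIdx
    split_ifs <;> omega
  obtain ⟨hGlen, hGchar⟩ := buildGraph_char hn hroads
  have hb : ∀ p ∈ roads, pvIdx (n + 1).toNat p.1 < (n + 1).toNat ∧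
      pvIdx (n + 1).toNat p.2 < (n + 1).toNat := by
    intro p hp
    have := hroads p hp
    unfold pvIdx
    constructor <;> (split_ifs <;> omega)
  have hvg : validG (buildGraph n roads) (n + 1).toNat := by
    intro adj hadj x hx
    have hbnd := mem_buildGraph hroads adj hadj x hx
    unfold pvIdx
    split_ifs <;> omega
  have hrep : (List.replicate (n + 1).toNat (-1 : Int))[pvIdx (n + 1).toNat destination]! = -1 := by
    rw [getElem!_pos _ _ (by simpa using hdlt)]
    simp
  have hcnt : ((List.replicate (n + 1).toNat (-1 : Int)).set
      (pvIdx (n + 1).toNat destination) 0).count (-1) = n.toNat := by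
    have := count_set_neg 0 (by omega) (List.replicate (n + 1).toNat (-1 : Int))
      (pvIdx (n + 1).toNat destination) (by simpa using hdlt) hrep
    have hrc : (List.replicate (n + 1).toNat (-1 : Int)).count (-1) = (n + 1).toNat := by simp
    omega
  set d0 := (List.replicate (n + 1).toNat (-1 : Int)).set (pvIdx (n + 1).toNat destination) 0
    with hd0def
  have hd0len : d0.length = (n + 1).toNat := by simp [hd0def]
  have hgetd0 : ∀ i, i < (n + 1).toNat →
      d0.getD i 0 = if i = pvIdx (n + 1).toNat destination then 0 else -1 := by
    intro i hi
    by_cases hie : i = pvIdx (n + 1).toNat destination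
    · rw [if_pos hie, hie, hd0def, getD_set_self _ _ _ (by simpa using hdlt)]
    · rw [if_neg hie, hd0def, getD_set_ne _ _ _ _ (fun e => hie e.symm),
        List.getD_eq_getElem _ _ (by simpa using hi)]
      simp
  have hInv : BfsInv (n + 1).toNat d0 [destination] 0 := by
    refine ⟨hd0len, le_refl 0, ?_, ?_, ?_⟩
    · intro i hi
      rw [hgetd0 i hi]
      constructor
      · intro hv
        by_cases he : i = pvIdx (n + 1).toNat destination
        · exact ⟨destination, by simp, he.symm⟩
        · rw [if_neg he] at hv
          omega
      · rintro ⟨x, hx, hxi⟩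
        rw [List.mem_singleton] at hx
        subst hx
        rw [if_pos hxi.symm]
    · intro i hi
      rw [hgetd0 i hi]
      split_ifs <;> omega
    · intro x hx
      rw [List.mem_singleton] at hx
      subst hx
      exact hdlt
  have hA := main_lemma (buildGraph n roads) n.toNat d0 [destination] 0
    (n.toNat + 1) (n.toNat + 1) (by rw [hd0len]; exact hvg) (by omega) hcnt (by simp) (by omega)
  have hB := bridge (buildGraph n roads) roads (n + 1).toNat hGlen hb hvg hGchar
    n.toNat d0 [destination] 0 (n.toNat + 1) (n.toNat + 2) hInv hcnt (by omega) (by omega)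
  have hAB : loopA (buildGraph n roads) (n.toNat + 1) d0 [(destination, 0)] =
      loopS roads (n.toNat + 2) d0 0 := by
    rw [← hB]
    simpa using hA
  rw [hAB]
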